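-- pv_equiv track=rewrite | github.com/SeongBeomLEE/CodingTest | BAEK/BAEK_Sort_04.py | frq
-- ===== SOURCE A (Python) =====
-- def frq(v):
--     v_dict = {}
--     for i in v:
--         if i in v_dict:
--             v_dict[i] += 1
--         else:
--             v_dict[i] = 1
--
--     max_num = max(list(v_dict.values()))
--     result = []
--     for k in v_dict.keys():
--         if v_dict[k] == max_num:
--             result.append(k)
--     result.sort()
--     if len(result) >= 2: return result[1]
--     else: return result[0]
-- ===== SOURCE B (Python) =====
-- def frq(v):
--     w = sorted(v)
--     groups = []
--     for x in w:
--         if groups and groups[-1][0] == x: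
--             groups[-1] = (x, groups[-1][1] + 1)
--         else:
--             groups.append((x, 1))
--     m = max(c for _, c in groups)
--     cand = [x for x, c in groups if c == m]
--     return cand[1] if len(cand) >= 2 else cand[0]
-- ===== Notes on version B (the rewrite author's own statement) =====
-- stated objective: alternative
-- what changed: Replaces the dict-counting loop plus sort of the max-count keys with a sort-then-group strategy: sort a copy of the input, collapse consecutive equal elements into (value, count) pairs (already in ascending order), take the max count and pick the second (or only) candidate without any dict or extra sort.
import Mathlib
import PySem

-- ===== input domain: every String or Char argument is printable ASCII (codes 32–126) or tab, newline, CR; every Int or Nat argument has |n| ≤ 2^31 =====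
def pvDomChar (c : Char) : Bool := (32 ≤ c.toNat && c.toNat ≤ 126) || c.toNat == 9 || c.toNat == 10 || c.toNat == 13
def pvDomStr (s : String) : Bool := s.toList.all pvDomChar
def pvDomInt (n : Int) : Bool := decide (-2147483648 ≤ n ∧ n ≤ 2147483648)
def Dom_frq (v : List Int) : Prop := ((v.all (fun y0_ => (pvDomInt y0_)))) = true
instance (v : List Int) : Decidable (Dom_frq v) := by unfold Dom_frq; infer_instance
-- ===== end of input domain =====

-- B replaces the dict-counting loop plus sort of the max-count keys with a sort-then-group
-- pass: sort a copy, collapse equal runs into (value, count) pairs, pick the second-or-only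
-- candidate of maximal count (same cost class, a genuinely different strategy).

-- ===== PORT A =====
def frq (v : List Int) : Int :=
  let vd : PySem.Dict Int Int :=
    v.foldl (fun d i => if d.contains i then d.modify i 0 (fun x => x + 1) else d.insert i 1)
      PySem.Dict.empty
  let maxNum : Int := (PySem.List.max? vd.values (fun x => x)).getD 0
  let result : List Int :=
    vd.keys.foldl (fun r k => if vd.getD k 0 == maxNum then r ++ [k] else r) []
  let result := PySem.List.sorted result (fun x => x) false
  if result.length ≥ 2 then (PySem.List.pyGet? result 1).getD 0
  else (PySem.List.pyGet? result 0).getD 0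

-- ===== PORT B =====
-- one iteration of B's grouping loop: 'if groups and groups[-1][0] == x: …'
def frqStep (gs : List (Int × Int)) (x : Int) : List (Int × Int) :=
  match gs.getLast? with
  | some (y, c) => if y == x then gs.dropLast ++ [(x, c + 1)] else gs ++ [(x, 1)]
  | none => gs ++ [(x, 1)]

def frq_alt (v : List Int) : Int :=
  let w := PySem.List.sorted v (fun x => x) false
  let groups := w.foldl frqStep []
  let m : Int := (PySem.List.max? (groups.map (fun p => p.2)) (fun x => x)).getD 0
  let cand := (groups.filter (fun p => p.2 == m)).map (fun p => p.1)
  if cand.length ≥ 2 then (PySem.List.pyGet? cand 1).getD 0 else (PySem.List.pyGet? cand 0).getD 0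

-- ===== PRECONDITION & SPEC =====
-- On the empty list A raises ValueError (max of an empty sequence) and B raises the same; excluded.
def Pre_frq (v : List Int) : Prop := v ≠ []
instance (v : List Int) : Decidable (Pre_frq v) := by unfold Pre_frq; infer_instance
def pvWitness_frq : List Int := [1, 2, 2, 3]
def Spec_frq (v : List Int) (out : Int) : Prop := out = frq_alt v
instance (v : List Int) (out : Int) : Decidable (Spec_frq v out) := by unfold Spec_frq; infer_instance

-- ===== CLAIM (what is proved, stated in full; the proofs are below) =====
def Claim_equal_frq : Prop := ∀ (v : List Int), Dom_frq v → Pre_frq v → Spec_frq v (frq v)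

-- ===== LEMMAS AND PROOFS =====

-- set(xs), kept in first-occurrence order, is a sublist of xs
lemma ofList_sublist (xs : List Int) : (PySem.Set.ofList xs).Sublist xs := by
  induction xs using List.reverseRecOn with
  | nil => simp [PySem.Set.ofList]
  | append_singleton w x ih =>
    rw [PySem.Set.ofList_append_singleton, PySem.Set.add]
    split
    · exact ih.trans (List.sublist_append_left w [x])
    · exact List.Sublist.append ih (List.Sublist.refl [x])

lemma ofList_ne_nil (w : List Int) (hw : w ≠ []) : PySem.Set.ofList w ≠ [] := by
  obtain ⟨a, t, rfl⟩ := List.exists_cons_of_ne_nil hw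
  intro h
  have : a ∈ PySem.Set.ofList (a :: t) := (PySem.Set.mem_ofList _ _).mpr (by simp)
  simp [h] at this

-- B's grouping loop over a sorted list yields each distinct value with its count, in order
lemma groups_eq (w : List Int) (hw : w.Pairwise (· ≤ ·)) :
    w.foldl frqStep [] = (PySem.Set.ofList w).map (fun y => (y, (w.count y : Int))) := by
  induction w using List.reverseRecOn with
  | nil => simp [PySem.Set.ofList]
  | append_singleton w x ih =>
    have hw' : w.Pairwise (· ≤ ·) := (List.pairwise_append.mp hw).1
    have hle : ∀ u ∈ w, u ≤ x := fun u hu => (List.pairwise_append.mp hw).2.2 u hu x (by simp)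
    rw [List.foldl_append, ih hw', List.foldl_cons, List.foldl_nil]
    rcases List.eq_nil_or_concat (PySem.Set.ofList w) with hnil | ⟨ds, y, hds⟩
    · have hwnil : w = [] := by
        by_contra h; exact ofList_ne_nil w h hnil
      subst hwnil
      simp [frqStep, PySem.Set.ofList, PySem.Set.add, PySem.Set.contains]
    · rw [List.concat_eq_append] at hds
      have hnd : (ds ++ [y]).Nodup := hds ▸ PySem.Set.nodup_ofList w
      have hynotds : y ∉ ds := by
        intro h; exact (List.disjoint_of_nodup_append hnd) h (by simp)
      have hymem : y ∈ w := by
        have : y ∈ PySem.Set.ofList w := hds ▸ (by simp)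
        exact (PySem.Set.mem_ofList _ _).mp this
      have hpair : (ds ++ [y]).Pairwise (· ≤ ·) :=
        hds ▸ List.Pairwise.sublist (hds ▸ ofList_sublist w) hw'
      have hxw_iff : x ∈ w ↔ x = y := by
        constructor
        · intro hx
          have hx' : x ∈ ds ++ [y] := hds ▸ (PySem.Set.mem_ofList _ _).mpr hx
          have hxy : x ≤ y := by
            rcases List.mem_append.mp hx' with h | h
            · exact (List.pairwise_append.mp hpair).2.2 x h y (by simp)
            · simp at h; omega
          exact le_antisymm hxy (hle y hymem)
        · intro h; exact h ▸ hymem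
      rw [hds, List.map_append, List.map_cons, List.map_nil]
      by_cases hx : x ∈ w
      · have hxy : x = y := hxw_iff.mp hx
        subst hxy
        rw [PySem.Set.ofList_append_singleton, hds]
        have hadd : PySem.Set.add (ds ++ [x]) x = ds ++ [x] := by
          simp [PySem.Set.add, PySem.Set.contains]
        rw [hadd]
        simp only [frqStep, List.getLast?_concat, beq_self_eq_true, if_true,
          List.dropLast_concat, List.map_append, List.map_cons, List.map_nil]
        congr 1
        · apply List.map_congr_left
          intro z hz
          have hzx : z ≠ x := fun h => hynotds (h ▸ hz)
          simp [List.count_append, Ne.symm hzx]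
        · simp [List.count_append]
      · have hxy : x ≠ y := fun h => hx (hxw_iff.mpr h)
        rw [PySem.Set.ofList_append_singleton, hds]
        have hadd : PySem.Set.add (ds ++ [y]) x = (ds ++ [y]) ++ [x] := by
          have : x ∉ ds ++ [y] := by
            intro h
            exact hx ((PySem.Set.mem_ofList _ _).mp (hds ▸ h))
          simp [PySem.Set.add, PySem.Set.contains, this]
        rw [hadd]
        have hbeq : (y == x) = false := by simpa using fun h => hxy h.symm
        simp only [frqStep, List.getLast?_concat, hbeq, Bool.false_eq_true, if_false,
          List.map_append, List.map_cons, List.map_nil]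
        congr 1
        · congr 1
          · apply List.map_congr_left
            intro z hz
            have hzw : z ∈ w := (PySem.Set.mem_ofList _ _).mp (hds ▸ List.mem_append_left _ hz)
            have hzx : z ≠ x := fun h => hx (h ▸ hzw)
            simp [List.count_append, Ne.symm hzx]
          · have h1 : ¬ x = y := hxy
            simp [List.count_append, h1]
        · have hc0 : w.count x = 0 := List.count_eq_zero.mpr hx
          simp [List.count_append, hc0]

-- A's dict-building loop is collections.Counter
lemma frq_fold_eq_counter (v : List Int) :
    v.foldl (fun d i => if d.contains i then d.modify i 0 (fun x => x + 1) else d.insert i 1)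
      PySem.Dict.empty = PySem.Dict.counter v := by
  unfold PySem.Dict.counter
  congr 1
  funext d i
  by_cases h : d.contains i
  · simp [h]
  · simp only [h, if_neg, Bool.false_eq_true, not_false_iff]
    simp [PySem.Dict.modify, PySem.Dict.getD_of_not_contains _ _ (by simpa using h)]

-- two nonempty lists with the same elements have the same maximum
lemma max?_id_eq_of_mutual (L1 L2 : List Int) (h1 : L1 ≠ []) (h2 : L2 ≠ [])
    (hm1 : ∀ y ∈ L1, y ∈ L2) (hm2 : ∀ y ∈ L2, y ∈ L1) :
    PySem.List.max? L1 (fun x => x) = PySem.List.max? L2 (fun x => x) := by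
  obtain ⟨m1, hmax1⟩ := Option.ne_none_iff_exists'.mp
    (fun h => h1 ((PySem.List.max?_eq_none_iff L1 (fun x => x)).mp h))
  obtain ⟨m2, hmax2⟩ := Option.ne_none_iff_exists'.mp
    (fun h => h2 ((PySem.List.max?_eq_none_iff L2 (fun x => x)).mp h))
  rw [hmax1, hmax2]
  have e1 : m1 ≤ m2 := by
    have := PySem.List.max?_isMax hmax2 m1 (hm1 m1 (PySem.List.max?_mem hmax1)); simpa using this
  have e2 : m2 ≤ m1 := by
    have := PySem.List.max?_isMax hmax1 m2 (hm2 m2 (PySem.List.max?_mem hmax2)); simpa using this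
  rw [le_antisymm e1 e2]

theorem frq_main (v : List Int) (hv : v ≠ []) : frq v = frq_alt v := by
  unfold frq frq_alt
  simp only [frq_fold_eq_counter]
  set w := PySem.List.sorted v (fun x => x) false with hwdef
  have hperm : w.Perm v := PySem.List.sorted_perm v (fun x => x) false
  have hwpair : w.Pairwise (· ≤ ·) := by
    have := PySem.List.sorted_pairwise v (fun x => x)
    simpa using this
  have hwne : w ≠ [] := by
    intro h
    exact hv (List.Perm.eq_nil (h ▸ hperm).symm ▸ rfl)
  have hcount : ∀ z : Int, w.count z = v.count z := fun z => hperm.count_eq z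
  have hmemw : ∀ z : Int, z ∈ w ↔ z ∈ v := fun z => hperm.mem_iff
  rw [groups_eq w hwpair]
  have hvalA : (PySem.Dict.counter v).values
      = (PySem.Set.ofList v).map (fun k => ((v.count k : Int))) := by
    rw [PySem.Dict.values_eq_map_keys _ (PySem.Dict.nodup_keys_counter v) 0,
      PySem.Dict.keys_counter]
    exact List.map_congr_left (fun k _ => PySem.Dict.getD_counter v k)
  have hvalB : ((PySem.Set.ofList w).map (fun y => (y, (w.count y : Int)))).map (fun p => p.2)
      = (PySem.Set.ofList w).map (fun k => ((v.count k : Int))) := by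
    rw [List.map_map]
    exact List.map_congr_left (fun k _ => by simp [hcount])
  have hmaxeq : PySem.List.max? (PySem.Dict.counter v).values (fun x => x)
      = PySem.List.max?
          (((PySem.Set.ofList w).map (fun y => (y, (w.count y : Int)))).map (fun p => p.2))
          (fun x => x) := by
    rw [hvalA, hvalB]
    apply max?_id_eq_of_mutual
    · simpa [List.map_eq_nil_iff] using ofList_ne_nil v hv
    · simpa [List.map_eq_nil_iff] using ofList_ne_nil w hwne
    · intro y hy
      rw [List.mem_map] at hy ⊢
      obtain ⟨k, hk, rfl⟩ := hy
      exact ⟨k, (PySem.Set.mem_ofList _ _).mpr ((hmemw k).mpr ((PySem.Set.mem_ofList _ _).mp hk)), rfl⟩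
    · intro y hy
      rw [List.mem_map] at hy ⊢
      obtain ⟨k, hk, rfl⟩ := hy
      exact ⟨k, (PySem.Set.mem_ofList _ _).mpr ((hmemw k).mp ((PySem.Set.mem_ofList _ _).mp hk)), rfl⟩
  rw [hmaxeq]
  set m : Int := (PySem.List.max?
      (((PySem.Set.ofList w).map (fun y => (y, (w.count y : Int)))).map (fun p => p.2))
      (fun x => x)).getD 0 with hmdef
  have hfold :
      (PySem.Dict.counter v).keys.foldl
        (fun r k => if (PySem.Dict.counter v).getD k 0 == m then r ++ [k] else r) []
        = ((PySem.Set.ofList v) : List Int).filter (fun k => ((v.count k : Int)) == m) := by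
    rw [PySem.Dict.keys_counter]
    have := PySem.List.foldl_append_if (fun k => (PySem.Dict.counter v).getD k 0 == m)
      (fun k => k) (PySem.Set.ofList v) []
    simp only [List.nil_append, List.map_id'] at this
    rw [this]
    exact List.filter_congr (fun k _ => by rw [PySem.Dict.getD_counter])
  rw [hfold]
  have hcand :
      (((PySem.Set.ofList w).map (fun y => (y, (w.count y : Int)))).filter
          (fun p => p.2 == m)).map (fun p => p.1)
        = (PySem.Set.ofList w).filter (fun k => ((v.count k : Int)) == m) := by
    rw [List.filter_map, List.map_map]
    have : ((fun (p : Int × Int) => p.2 == m) ∘ (fun y => (y, (w.count y : Int))))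
        = fun k => ((w.count k : Int)) == m := rfl
    rw [this]
    rw [List.filter_congr (fun k _ => by rw [hcount k])]
    exact List.map_id _
  rw [hcand]
  have hofw_pair : (PySem.Set.ofList w).Pairwise (· < ·) := by
    have hle : (PySem.Set.ofList w).Pairwise (· ≤ ·) :=
      List.Pairwise.sublist (ofList_sublist w) hwpair
    have hnd : (PySem.Set.ofList w).Nodup := PySem.Set.nodup_ofList w
    exact (hle.and hnd).imp (fun h => lt_of_le_of_ne h.1 h.2)
  have hsorted :
      PySem.List.sorted (((PySem.Set.ofList v) : List Int).filter
          (fun k => ((v.count k : Int)) == m)) (fun x => x) false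
        = (PySem.Set.ofList w).filter (fun k => ((v.count k : Int)) == m) := by
    apply PySem.List.sorted_eq_of_perm_of_pairwise_lt
    · rw [List.perm_ext_iff_of_nodup
        (List.Nodup.filter _ (PySem.Set.nodup_ofList w))
        (List.Nodup.filter _ (PySem.Set.nodup_ofList v))]
      intro a
      simp only [List.mem_filter, PySem.Set.mem_ofList, hmemw a]
    · exact List.Pairwise.filter _ hofw_pair
  rw [hsorted]

-- ===== VERDICT (by name: the statement is the Claim_ definition above) =====
theorem frq_spec : Claim_equal_frq := by
  unfold Claim_equal_frq
  intro v _ hv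
  unfold Spec_frq
  exact frq_main v hv
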